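-- pv_equiv track=rewrite | github.com/stajama/CodingBatProject | codingbat.py | lone_sum
-- ===== SOURCE A (Python) =====
-- def lone_sum(a, b, c):
--     '''Given 3 int values, a b c, return their sum. However, if one of the
--     values is the same as another of the values, it does not count towards
--     the sum.'''
--     sumList = [a, b, c]
--     killList = []
--     for i in sumList:
--         if not sumList.count(i) > 1:
--             if i not in killList:
--                 killList.append(i)
--     return sum(killList)
-- ===== SOURCE B (Python) =====
-- def lone_sum(a, b, c):
--     if a == b == c:
--         return 0
--     if a == b:
--         return c
--     if a == c:
--         return b
--     if b == c:
--         return a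
--     return a + b + c
-- ===== Notes on version B (the rewrite author's own statement) =====
-- stated objective: simpler
-- what changed: Replaces A's list-building, counting and deduplicating loop with a direct closed-form case analysis on the three values (all equal, each pair, all distinct).
import Mathlib
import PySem

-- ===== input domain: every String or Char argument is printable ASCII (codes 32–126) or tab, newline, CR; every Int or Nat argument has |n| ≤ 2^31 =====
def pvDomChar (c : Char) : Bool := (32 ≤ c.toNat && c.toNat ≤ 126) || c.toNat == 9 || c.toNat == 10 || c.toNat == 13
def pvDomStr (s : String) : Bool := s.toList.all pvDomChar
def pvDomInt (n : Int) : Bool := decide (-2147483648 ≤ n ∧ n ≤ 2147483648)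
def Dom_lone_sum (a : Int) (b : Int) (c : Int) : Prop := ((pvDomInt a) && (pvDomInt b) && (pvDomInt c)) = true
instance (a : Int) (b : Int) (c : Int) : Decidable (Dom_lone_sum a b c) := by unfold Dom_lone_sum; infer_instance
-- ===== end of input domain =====

-- B replaces A's list/count/dedup loop with a closed-form case analysis; objective: simpler.


-- ===== PORT A =====
-- literal transliteration: build sumList, fold the loop that appends i to killList
-- when sumList.count i ≤ 1 and i is not yet in killList, then sum killList
def lone_sum (a : Int) (b : Int) (c : Int) : Int :=
  let sumList : List Int := [a, b, c]
  let killList : List Int :=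
    sumList.foldl (fun killList i =>
      if ¬ (PySem.List.count sumList i > 1) then
        if ¬ (i ∈ killList) then killList ++ [i] else killList
      else killList) []
  killList.sum

-- ===== PORT B =====
def lone_sum_alt (a : Int) (b : Int) (c : Int) : Int :=
  if a = b ∧ b = c then 0
  else if a = b then c
  else if a = c then b
  else if b = c then a
  else a + b + c

-- ===== PRECONDITION & SPEC =====
def Spec_lone_sum (a : Int) (b : Int) (c : Int) (out : Int) : Prop := out = lone_sum_alt a b c
instance (a : Int) (b : Int) (c : Int) (out : Int) : Decidable (Spec_lone_sum a b c out) := by unfold Spec_lone_sum; infer_instance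

-- ===== CLAIM (what is proved, stated in full; the proofs are below) =====
def Claim_equal_lone_sum : Prop := ∀ (a : Int) (b : Int) (c : Int), Dom_lone_sum a b c → Spec_lone_sum a b c (lone_sum a b c)

-- ===== LEMMAS AND PROOFS =====

-- ===== VERDICT (by name: the statement is the Claim_ definition above) =====
theorem lone_sum_spec : Claim_equal_lone_sum := by
  intro a b c _
  unfold Spec_lone_sum lone_sum lone_sum_alt
  simp only [List.foldl, PySem.List.count]
  by_cases hab : a = b <;> by_cases hac : a = c <;> by_cases hbc : b = c <;>
    simp_all <;> split_ifs <;> simp_all <;> omega
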